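-- pv_equiv track=rewrite | github.com/StefanSebastian/BeerReviewClustering | src/main/algorithms/kd_tree_seed/utils.py | get_bounding_points
-- ===== SOURCE A (Python) =====
-- def get_bounding_points(points):
--     nr_feat = len(points[0])
--     min_pt, max_pt = [None] * nr_feat, [None] * nr_feat
--     for point in points:
--         for feature_idx in range(nr_feat):
--             if min_pt[feature_idx] is None or point[feature_idx] < min_pt[feature_idx]:
--                 min_pt[feature_idx] = point[feature_idx]
--             if max_pt[feature_idx] is None or point[feature_idx] > max_pt[feature_idx]:
--                 max_pt[feature_idx] = point[feature_idx]
--     return min_pt, max_pt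
-- ===== SOURCE B (Python) =====
-- def get_bounding_points(points):
--     cols = list(zip(*points))
--     return [min(c) for c in cols], [max(c) for c in cols]
-- ===== Notes on version B (the rewrite author's own statement) =====
-- stated objective: idiomatic
-- what changed: B transposes the points with zip(*points) and maps builtin min/max over each column, replacing A's row-major nested loop that accumulates into None-sentinel lists by index assignment.
import Mathlib
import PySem

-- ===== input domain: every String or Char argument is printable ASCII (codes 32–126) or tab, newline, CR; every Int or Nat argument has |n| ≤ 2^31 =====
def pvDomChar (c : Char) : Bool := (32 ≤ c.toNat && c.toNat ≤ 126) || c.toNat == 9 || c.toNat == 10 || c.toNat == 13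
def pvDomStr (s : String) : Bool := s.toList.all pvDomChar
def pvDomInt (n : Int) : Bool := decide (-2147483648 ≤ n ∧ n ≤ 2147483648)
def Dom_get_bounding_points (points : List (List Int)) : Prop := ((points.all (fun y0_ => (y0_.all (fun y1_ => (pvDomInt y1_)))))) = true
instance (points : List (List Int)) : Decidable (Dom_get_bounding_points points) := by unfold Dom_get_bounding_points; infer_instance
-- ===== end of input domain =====

-- B transposes with zip(*points) and maps builtin min/max over each column, instead of A's
-- row-major nested accumulation loop with None sentinels (objective: idiomatic, same cost).

-- ===== PORT A =====
-- one body of A's inner loop: update index fi of the min/max Option-lists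
-- (indices are nonnegative and, inside Pre_, in range, so getD/set are exact for Python's
-- point[fi] / min_pt[fi] / assignment there)
def pvStepFeat (point : List Int) (st : List (Option Int) × List (Option Int)) (fi : Nat) :
    List (Option Int) × List (Option Int) :=
  let v := point.getD fi 0
  let mn := match st.1.getD fi none with
            | none => st.1.set fi (some v)
            | some m => if v < m then st.1.set fi (some v) else st.1
  let mx := match st.2.getD fi none with
            | none => st.2.set fi (some v)
            | some m => if m < v then st.2.set fi (some v) else st.2
  (mn, mx)

def get_bounding_points (points : List (List Int)) : List Int × List Int :=
  let nr_feat := (points.headD []).length          -- len(points[0]); [] only outside Pre_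
  let init : List (Option Int) := List.replicate nr_feat none
  let fin := points.foldl
    (fun st point => (List.range nr_feat).foldl (pvStepFeat point) st) (init, init)
  -- inside Pre_ every entry is `some`; the 0 default is never used there
  (fin.1.map (fun o => o.getD 0), fin.2.map (fun o => o.getD 0))

-- ===== PORT B =====
-- port of Python's zip(*rows): columns up to the shortest row's length
def pvZipStar (rows : List (List Int)) : List (List Int) :=
  match rows with
  | [] => []
  | r :: rs =>
    let n := rs.foldl (fun m l => Nat.min m l.length) r.length
    (List.range n).map (fun i => (r :: rs).map (fun l => l.getD i 0))

-- builtin min/max of a nonempty list (columns from zip of nonempty rows are nonempty;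
-- the [] branch is unreachable there)
def pvMinList (c : List Int) : Int := match c with | [] => 0 | x :: xs => xs.foldl min x
def pvMaxList (c : List Int) : Int := match c with | [] => 0 | x :: xs => xs.foldl max x

def get_bounding_points_alt (points : List (List Int)) : List Int × List Int :=
  let cols := pvZipStar points
  (cols.map pvMinList, cols.map pvMaxList)

-- ===== PRECONDITION & SPEC =====
-- Pre_ excludes exactly the inputs where A raises IndexError: empty `points`, and a
-- point shorter than points[0].
def Pre_get_bounding_points (points : List (List Int)) : Prop :=
  points ≠ [] ∧ ∀ p ∈ points, (points.headD []).length ≤ p.length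
instance (points : List (List Int)) : Decidable (Pre_get_bounding_points points) := by
  unfold Pre_get_bounding_points; infer_instance
def pvWitness_get_bounding_points : List (List Int) := [[1, 5], [3, 2]]


def Spec_get_bounding_points (points : List (List Int)) (out : List Int × List Int) : Prop :=
  out = get_bounding_points_alt points
instance (points : List (List Int)) (out : List Int × List Int) :
    Decidable (Spec_get_bounding_points points out) := by
  unfold Spec_get_bounding_points; infer_instance

-- ===== CLAIM (what is proved, stated in full; the proofs are below) =====
def Claim_equal_get_bounding_points : Prop :=
  ∀ (points : List (List Int)), Dom_get_bounding_points points →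
    Pre_get_bounding_points points →
    Spec_get_bounding_points points (get_bounding_points points)

-- ===== LEMMAS AND PROOFS =====

def pvCmin (o : Option Int) (v : Int) : Int := match o with | none => v | some m => min m v
def pvCmax (o : Option Int) (v : Int) : Int := match o with | none => v | some m => max m v

theorem pv_map_range_congr {n : Nat} (h1 h2 : Nat → Option Int)
    (h : ∀ i < n, h1 i = h2 i) :
    (List.range n).map h1 = (List.range n).map h2 :=
  List.map_congr_left (fun i hi => h i (List.mem_range.mp hi))

theorem pv_getD_map_range {n k : Nat} (h : Nat → Option Int) (hk : k < n) :
    ((List.range n).map h).getD k none = h k := by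
  have hk' : k < ((List.range n).map h).length := by simpa using hk
  rw [List.getD_eq_getElem _ _ hk']
  simp

theorem pv_set_map_range {n k : Nat} (h : Nat → Option Int) (v : Option Int) (_hk : k < n) :
    ((List.range n).map h).set k v = (List.range n).map (fun i => if i = k then v else h i) := by
  apply List.ext_getElem
  · simp
  · intro i h1 h2
    simp only [List.getElem_set, List.getElem_map, List.getElem_range]
    by_cases hik : i = k <;> simp [hik, Ne.symm]

theorem pv_step_map (pt : List Int) {n k : Nat} (hk : k < n) (f g : Nat → Option Int) :
    pvStepFeat pt ((List.range n).map f, (List.range n).map g) k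
    = ((List.range n).map (fun i => if i = k then some (pvCmin (f k) (pt.getD k 0)) else f i),
       (List.range n).map (fun i => if i = k then some (pvCmax (g k) (pt.getD k 0)) else g i)) := by
  unfold pvStepFeat
  simp only [pv_getD_map_range f hk, pv_getD_map_range g hk]
  refine Prod.ext ?_ ?_ <;> dsimp only
  · cases hf : f k with
    | none =>
      dsimp only
      rw [pv_set_map_range _ _ hk]
      refine pv_map_range_congr _ _ (fun i _ => ?_)
      by_cases hik : i = k
      · subst hik; simp [pvCmin]
      · simp [hik]
    | some m =>
      dsimp only
      split_ifs with hv
      · rw [pv_set_map_range _ _ hk]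
        refine pv_map_range_congr _ _ (fun i _ => ?_)
        by_cases hik : i = k
        · subst hik; simp [pvCmin, List.getD] at hv ⊢; omega
        · simp [hik]
      · refine pv_map_range_congr _ _ (fun i _ => ?_)
        by_cases hik : i = k
        · subst hik; simp [hf, pvCmin, List.getD] at hv ⊢; omega
        · simp [hik]
  · cases hg : g k with
    | none =>
      dsimp only
      rw [pv_set_map_range _ _ hk]
      refine pv_map_range_congr _ _ (fun i _ => ?_)
      by_cases hik : i = k
      · subst hik; simp [pvCmax]
      · simp [hik]
    | some m =>
      dsimp only
      split_ifs with hv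
      · rw [pv_set_map_range _ _ hk]
        refine pv_map_range_congr _ _ (fun i _ => ?_)
        by_cases hik : i = k
        · subst hik; simp [pvCmax, List.getD] at hv ⊢; omega
        · simp [hik]
      · refine pv_map_range_congr _ _ (fun i _ => ?_)
        by_cases hik : i = k
        · subst hik; simp [hg, pvCmax, List.getD] at hv ⊢; omega
        · simp [hik]

theorem pv_inner (pt : List Int) (n : Nat) (f g : Nat → Option Int) :
    ∀ k, k ≤ n →
    (List.range k).foldl (pvStepFeat pt) ((List.range n).map f, (List.range n).map g)
    = ((List.range n).map (fun i => if i < k then some (pvCmin (f i) (pt.getD i 0)) else f i),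
       (List.range n).map (fun i => if i < k then some (pvCmax (g i) (pt.getD i 0)) else g i)) := by
  intro k
  induction k with
  | zero =>
    intro _
    rw [List.range_zero, List.foldl_nil]
    refine Prod.ext ?_ ?_ <;>
      exact (pv_map_range_congr _ _ (fun i _ => by simp)).symm
  | succ k ih =>
    intro hk
    rw [List.range_succ, List.foldl_append, ih (Nat.le_of_succ_le hk)]
    simp only [List.foldl_cons, List.foldl_nil]
    rw [pv_step_map pt hk]
    refine Prod.ext ?_ ?_ <;> dsimp only <;>
      refine pv_map_range_congr _ _ (fun i _ => ?_) <;>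
      rcases Nat.lt_trichotomy i k with hlt | heq | hgt
    · simp [Nat.ne_of_lt hlt, hlt, Nat.lt_succ_of_lt hlt]
    · subst heq; simp
    · have h1 : ¬ i = k := by omega
      have h2 : ¬ i < k := by omega
      have h3 : ¬ i < k + 1 := by omega
      simp [h1, h2, h3]
    · simp [Nat.ne_of_lt hlt, hlt, Nat.lt_succ_of_lt hlt]
    · subst heq; simp
    · have h1 : ¬ i = k := by omega
      have h2 : ¬ i < k := by omega
      have h3 : ¬ i < k + 1 := by omega
      simp [h1, h2, h3]

theorem pv_inner_full (pt : List Int) (n : Nat) (f g : Nat → Option Int) :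
    (List.range n).foldl (pvStepFeat pt) ((List.range n).map f, (List.range n).map g)
    = ((List.range n).map (fun i => some (pvCmin (f i) (pt.getD i 0))),
       (List.range n).map (fun i => some (pvCmax (g i) (pt.getD i 0)))) := by
  rw [pv_inner pt n f g n le_rfl]
  refine Prod.ext ?_ ?_ <;>
    exact pv_map_range_congr _ _ (fun i hi => by simp [hi])

theorem pv_outer (n : Nat) (ps : List (List Int)) :
    ∀ (F G : Nat → Int),
    ps.foldl (fun st point => (List.range n).foldl (pvStepFeat point) st)
      ((List.range n).map (fun i => some (F i)), (List.range n).map (fun i => some (G i)))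
    = ((List.range n).map (fun i => some ((ps.map (fun q => q.getD i 0)).foldl min (F i))),
       (List.range n).map (fun i => some ((ps.map (fun q => q.getD i 0)).foldl max (G i)))) := by
  induction ps with
  | nil => intro F G; simp
  | cons pt ps ih =>
    intro F G
    simp only [List.foldl_cons]
    rw [pv_inner_full pt n]
    simp only [pvCmin, pvCmax]
    rw [ih (fun i => min (F i) (pt.getD i 0)) (fun i => max (G i) (pt.getD i 0))]
    simp

theorem pv_minlen (ps : List (List Int)) (a : Nat) (h : ∀ q ∈ ps, a ≤ q.length) :
    ps.foldl (fun m l => Nat.min m l.length) a = a := by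
  induction ps generalizing a with
  | nil => rfl
  | cons q ps ih =>
    simp only [List.foldl_cons]
    have hm : Nat.min a q.length = a := Nat.min_eq_left (h q (by simp))
    rw [hm]
    exact ih a (fun r hr => h r (by simp [hr]))

-- ===== VERDICT (by name: the statement is the Claim_ definition above) =====
theorem get_bounding_points_spec : Claim_equal_get_bounding_points := by
  intro points _ hpre
  unfold Spec_get_bounding_points
  obtain ⟨hne, hall⟩ := hpre
  cases points with
  | nil => exact absurd rfl hne
  | cons p ps =>
    simp only [List.headD_cons] at hall
    have hlen : ps.foldl (fun m l => Nat.min m l.length) p.length = p.length :=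
      pv_minlen ps p.length (fun q hq => hall q (by simp [hq]))
    have hrep : (List.replicate p.length (none : Option Int))
        = (List.range p.length).map (fun _ => none) := by simp
    simp only [get_bounding_points, get_bounding_points_alt, pvZipStar, List.headD_cons,
      hlen, hrep, List.foldl_cons]
    rw [pv_inner_full p p.length (fun _ => none) (fun _ => none)]
    simp only [pvCmin, pvCmax]
    rw [pv_outer p.length ps (fun i => p.getD i 0) (fun i => p.getD i 0)]
    simp [pvMinList, pvMaxList, List.map_map, Function.comp]
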